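-- pv_equiv track=rewrite | github.com/hgssczj/video-dag-manager | scheduler_func/acc_first_kb_chameleon.py | get_rsc_combination
-- ===== SOURCE A (Python) =====
-- def generate_rsc_combination(rsc_list, depth, length):
--     res = []
--     if depth == length:
--         for temp in rsc_list:
--             res.append([temp])
--     else:
--         temp_res = generate_rsc_combination(rsc_list, depth+1, length)
--         for temp_rsc in rsc_list:
--             for temp in temp_res:
--                 res.append([temp_rsc] + temp)
--     return res
--
-- def get_rsc_combination(rsc_list, serv_num, rsc_constraint):
--     # 此函数用于获取在边端部署的各个服务的资源分配量的组合方式（满足用户资源约束的部分）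
--     '''
--     rsc_list: 资源的取值列表
--     serv_num: 在边端部署的服务数量
--     rsc_constraint: 用户的资源约束
--     '''
--     if serv_num == 0:
--         return []
--     else:
--         res = generate_rsc_combination(rsc_list, 1, serv_num)  # 生成所有的资源组合
--
--         res_in_cons = []
--         for temp_res in res:
--             if sum(temp_res) <= rsc_constraint:  # 仅保留符合用户资源约束的部分
--                 res_in_cons.append(temp_res)
--
--         return res_in_cons
-- ===== SOURCE B (Python) =====
-- def get_rsc_combination(rsc_list, serv_num, rsc_constraint):
--     # Iterative level-by-level construction: each combination is extended on
--     # the right one slot per level, carrying its running sum alongside, so the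
--     # final constraint check needs no per-combination sum() pass.
--     if serv_num <= 0:
--         return []
--     combos = [([], 0)]
--     for _ in range(serv_num):
--         new = [(c + [v], s + v) for (c, s) in combos for v in rsc_list]
--         if not new:
--             return []
--         combos = new
--     return [c for (c, s) in combos if s <= rsc_constraint]
-- ===== Notes on version B (the rewrite author's own statement) =====
-- stated objective: alternative
-- what changed: B replaces A's depth-recursive cross-product construction plus a separate sum()-and-filter pass with an iterative level-by-level loop that extends each combination on the right while carrying its running sum, checking the constraint against the cached sums at the end. Pre_ excludes exactly the inputs where A raises RecursionError: serv_num < 0 (the recursion never reaches its base case) and serv_num >= 998 (A recurses one frame per service past CPython's default recursion limit of 1000; 997 is the last value at which A returns).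
import Mathlib
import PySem

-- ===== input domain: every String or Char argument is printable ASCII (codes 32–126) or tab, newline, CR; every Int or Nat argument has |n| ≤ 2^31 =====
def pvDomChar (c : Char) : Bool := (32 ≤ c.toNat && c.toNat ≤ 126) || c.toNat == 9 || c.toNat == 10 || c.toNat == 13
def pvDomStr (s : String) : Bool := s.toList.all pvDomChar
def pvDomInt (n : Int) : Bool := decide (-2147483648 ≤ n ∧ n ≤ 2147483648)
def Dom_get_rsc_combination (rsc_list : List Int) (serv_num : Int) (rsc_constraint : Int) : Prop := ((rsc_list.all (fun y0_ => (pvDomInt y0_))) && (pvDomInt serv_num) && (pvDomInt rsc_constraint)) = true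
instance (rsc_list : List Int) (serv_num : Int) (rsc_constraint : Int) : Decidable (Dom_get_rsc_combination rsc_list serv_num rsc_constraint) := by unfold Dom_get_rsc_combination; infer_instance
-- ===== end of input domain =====

-- B rebuilds the combinations iteratively, extending on the right with cached running sums,
-- instead of A's depth recursion followed by a separate sum-and-filter pass (same cost, alternative decomposition).

-- ===== PORT A =====
-- generate_rsc_combination(rsc_list, depth, length): the Python recurses while depth < length;
-- here the (length - depth) gap is the structural fuel. n = 0 is the depth == length base case.
def generate_rsc_combination (rsc_list : List Int) : Nat → List (List Int)
  | 0 => rsc_list.map (fun temp => [temp])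
  | n + 1 =>
    let temp_res := generate_rsc_combination rsc_list n
    rsc_list.flatMap (fun temp_rsc => temp_res.map (fun temp => temp_rsc :: temp))

def get_rsc_combination (rsc_list : List Int) (serv_num : Int) (rsc_constraint : Int) : List (List Int) :=
  if serv_num = 0 then []
  else
    let res := generate_rsc_combination rsc_list (serv_num - 1).toNat
    res.filter (fun temp_res => decide (temp_res.sum ≤ rsc_constraint))

-- ===== PORT B =====
-- one loop iteration: new = [(c + [v], s + v) for (c, s) in combos for v in rsc_list]
def stepB (rsc_list : List Int) (combos : List (List Int × Int)) : List (List Int × Int) :=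
  combos.flatMap (fun cs => rsc_list.map (fun v => (cs.1 ++ [v], cs.2 + v)))

-- the 'for _ in range(serv_num)' loop; 'none' models the early 'return []' when new is empty
def loopB (rsc_list : List Int) : Nat → List (List Int × Int) → Option (List (List Int × Int))
  | 0, combos => some combos
  | n + 1, combos =>
    let nw := stepB rsc_list combos
    if nw = [] then none else loopB rsc_list n nw

def get_rsc_combination_alt (rsc_list : List Int) (serv_num : Int) (rsc_constraint : Int) : List (List Int) :=
  if serv_num ≤ 0 then []
  else
    match loopB rsc_list serv_num.toNat [([], 0)] with
    | none => []
    | some combos => (combos.filter (fun cs => decide (cs.2 ≤ rsc_constraint))).map Prod.fst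

-- ===== PRECONDITION & SPEC =====
-- Pre_ excludes exactly the inputs where Python A raises RecursionError: serv_num < 0 (the
-- recursion's depth starts above length and only grows, never reaching its base case) and
-- serv_num ≥ 998 (A recurses one frame per service and exceeds CPython's default recursion
-- limit of 1000; serv_num = 997 is the last value at which A returns).
def Pre_get_rsc_combination (rsc_list : List Int) (serv_num : Int) (rsc_constraint : Int) : Prop :=
  0 ≤ serv_num ∧ serv_num ≤ 997
instance (rsc_list : List Int) (serv_num : Int) (rsc_constraint : Int) : Decidable (Pre_get_rsc_combination rsc_list serv_num rsc_constraint) := by unfold Pre_get_rsc_combination; infer_instance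

def pvWitness_get_rsc_combination : List Int × Int × Int := ([1, 2, 3], 2, 4)

def Spec_get_rsc_combination (rsc_list : List Int) (serv_num : Int) (rsc_constraint : Int) (out : List (List Int)) : Prop := out = get_rsc_combination_alt rsc_list serv_num rsc_constraint
instance (rsc_list : List Int) (serv_num : Int) (rsc_constraint : Int) (out : List (List Int)) : Decidable (Spec_get_rsc_combination rsc_list serv_num rsc_constraint out) := by unfold Spec_get_rsc_combination; infer_instance

-- ===== CLAIM =====
def Claim_equal_get_rsc_combination : Prop := ∀ (rsc_list : List Int) (serv_num : Int) (rsc_constraint : Int), Dom_get_rsc_combination rsc_list serv_num rsc_constraint → Pre_get_rsc_combination rsc_list serv_num rsc_constraint → Spec_get_rsc_combination rsc_list serv_num rsc_constraint (get_rsc_combination rsc_list serv_num rsc_constraint)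

-- ===== LEMMAS AND PROOFS =====

-- proof-side abbreviation: one right-extension level, on bare combinations
def extR (rsc_list : List Int) (L : List (List Int)) : List (List Int) :=
  L.flatMap (fun l => rsc_list.map (fun v => l ++ [v]))

def pairS (l : List Int) : List Int × Int := (l, l.sum)

theorem gen_nil (n : Nat) : generate_rsc_combination [] n = [] := by
  cases n <;> simp [generate_rsc_combination]

theorem extR_ne_nil (rsc_list : List Int) (h : rsc_list ≠ []) (L : List (List Int)) (hL : L ≠ []) :
    extR rsc_list L ≠ [] := by
  intro hcontra
  simp only [extR, List.flatMap_eq_nil_iff, List.map_eq_nil_iff] at hcontra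
  obtain ⟨l, hl⟩ := List.exists_mem_of_ne_nil _ hL
  exact h (hcontra l hl)

-- A's prepending recursion equals one right-extension of the previous level
theorem gen_snoc (rsc_list : List Int) (n : Nat) :
    generate_rsc_combination rsc_list (n + 1) = extR rsc_list (generate_rsc_combination rsc_list n) := by
  induction n with
  | zero => simp [generate_rsc_combination, extR, List.flatMap_map, Function.comp_def]
  | succ n ih =>
    rw [show generate_rsc_combination rsc_list (n + 2)
          = rsc_list.flatMap (fun v => (generate_rsc_combination rsc_list (n + 1)).map (v :: ·)) from rfl]
    conv_lhs => rw [ih]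
    conv_rhs => rw [show generate_rsc_combination rsc_list (n + 1)
          = rsc_list.flatMap (fun v => (generate_rsc_combination rsc_list n).map (v :: ·)) from rfl]
    simp only [extR, List.flatMap_map, List.map_flatMap, List.flatMap_assoc, List.map_map]
    apply List.flatMap_congr
    intro v _
    apply List.flatMap_congr
    intro l _
    simp [Function.comp_def]

theorem stepB_pair (rsc_list : List Int) (L : List (List Int)) :
    stepB rsc_list (L.map pairS) = (extR rsc_list L).map pairS := by
  simp only [stepB, extR, List.flatMap_map, List.map_flatMap, List.map_map]
  apply List.flatMap_congr
  intro l _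
  simp [pairS, Function.comp]

theorem loopB_some (rsc_list : List Int) (h : rsc_list ≠ []) (n : Nat) :
    ∀ (L : List (List Int)), L ≠ [] →
      loopB rsc_list n (L.map pairS) = some (((extR rsc_list)^[n] L).map pairS) := by
  induction n with
  | zero => intro L _; simp [loopB]
  | succ n ih =>
    intro L hL
    have hne := extR_ne_nil rsc_list h L hL
    simp only [loopB, stepB_pair]
    rw [if_neg (by simpa using hne), ih _ hne, Function.iterate_succ_apply]

theorem iterate_extR (rsc_list : List Int) (n : Nat) :
    (extR rsc_list)^[n + 1] [[]] = generate_rsc_combination rsc_list n := by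
  induction n with
  | zero => simp [extR, generate_rsc_combination]
  | succ n ih => rw [Function.iterate_succ_apply', ih, gen_snoc]

theorem loopB_nil (n : Nat) :
    loopB [] (n + 1) ([([], (0 : Int))]) = none := by
  simp [loopB, stepB]

theorem filter_pair (c : Int) (L : List (List Int)) :
    ((L.map pairS).filter (fun cs => decide (cs.2 ≤ c))).map Prod.fst
      = L.filter (fun l => decide (l.sum ≤ c)) := by
  induction L with
  | nil => rfl
  | cons x xs ih =>
    simp only [List.map_cons, List.filter_cons, pairS]
    by_cases h : x.sum ≤ c <;> simp [h, ih]

-- ===== VERDICT =====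
theorem get_rsc_combination_spec : Claim_equal_get_rsc_combination := by
  intro rsc_list serv_num rsc_constraint _ hpre
  obtain ⟨hpre, -⟩ := hpre
  unfold Spec_get_rsc_combination get_rsc_combination get_rsc_combination_alt
  rcases eq_or_lt_of_le hpre with h0 | hpos
  · simp [← h0]
  · have hne : ¬ serv_num = 0 := by omega
    have hle : ¬ serv_num ≤ 0 := by omega
    simp only [hne, hle, if_false]
    have hn : serv_num.toNat = (serv_num - 1).toNat + 1 := by omega
    rcases eq_or_ne rsc_list [] with hnil | hnonnil
    · subst hnil
      rw [hn, loopB_nil]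
      simp [gen_nil]
    · have hstart : ([([], (0 : Int))]) = ([([] : List Int)]).map pairS := by simp [pairS]
      rw [hn, hstart, loopB_some rsc_list hnonnil _ _ (by simp), iterate_extR]
      exact (filter_pair rsc_constraint _).symm
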